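-- pv_equiv track=rewrite | github.com/sekido88/Code-Ptit---Python | PY01041-SỐ TĂNG GIẢM.py | check
-- ===== SOURCE A (Python) =====
-- def check(v) :
--     if(len(v) < 3) : return False
--     for j in range(1,len(v)) :
--         if (int(v[j]) > int(v[j-1])) :
--             while (j < len(v) and int(v[j]) > int(v[j-1])) :
--                  j = j + 1
--             if (j == len(v)) :
--                 return True
--             else :
--                 if(int(v[j]) == int(v[j-1])) : return False
--
--         if (int(v[j]) < int(v[j-1])) :
--             while (j < len(v) and int(v[j]) < int(v[j-1])) :
--                 j = j + 1
--             if (j == len(v)) :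
--                 return True
--             else :
--                 return False
--     return True
-- ===== SOURCE B (Python) =====
-- def _drop_run(sig, want):
--     i = 0
--     while i < len(sig) and sig[i] == want:
--         i += 1
--     return sig[i:]
--
--
-- def check(v):
--     if len(v) < 3:
--         return False
--     xs = [int(c) for c in v]
--     sig = [(b > a) - (b < a) for a, b in zip(xs, xs[1:])]
--     # accepted shape: equal-prefix, then strictly-up block, then strictly-down block
--     return not _drop_run(_drop_run(_drop_run(sig, 0), 1), -1)
-- ===== Notes on version B (the rewrite author's own statement) =====
-- stated objective: simpler
-- what changed: Replaces A's nested index-chasing while-loops with early returns by one pass that builds the list of comparison signs and checks it matches the shape zeros*, then +1s, then -1s, via three drop-run passes.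
-- outside the precondition, e.g. on check('122x'): A returns False, B raises ValueError
import Mathlib
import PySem

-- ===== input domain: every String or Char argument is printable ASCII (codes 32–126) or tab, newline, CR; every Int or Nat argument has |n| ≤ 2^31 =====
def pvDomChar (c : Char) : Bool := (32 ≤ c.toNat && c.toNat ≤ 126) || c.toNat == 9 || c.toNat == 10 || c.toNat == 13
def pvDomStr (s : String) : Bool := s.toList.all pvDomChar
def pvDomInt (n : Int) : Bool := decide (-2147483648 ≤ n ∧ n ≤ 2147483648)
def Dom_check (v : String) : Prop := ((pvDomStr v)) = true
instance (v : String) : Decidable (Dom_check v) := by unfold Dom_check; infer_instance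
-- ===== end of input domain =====

-- B replaces A's nested index-walking while-loops with a sign list checked against the
-- shape 0*(+1)*(-1)* by three drop-run passes; objective: simpler.

-- ===== PORT A =====
-- int(v[j]) for a single char; exact on digit chars, which Pre_check guarantees.
def pvCharInt (c : Char) : Int := (PySem.Int.ofStr? (String.mk [c])).getD 0

-- while (j < len(v) and int(v[j]) > int(v[j-1])) : j = j + 1
-- (fuel = n - j only makes the loop structurally recursive; with that fuel it is exact)
def pvUpAux (g : Nat → Int) (n : Nat) : Nat → Nat → Nat
  | 0, j => j
  | fuel + 1, j =>
    if j < n then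
      if g j > g (j - 1) then pvUpAux g n fuel (j + 1) else j
    else j

def pvUp (g : Nat → Int) (n j : Nat) : Nat := pvUpAux g n (n - j) j

-- while (j < len(v) and int(v[j]) < int(v[j-1])) : j = j + 1
def pvDownAux (g : Nat → Int) (n : Nat) : Nat → Nat → Nat
  | 0, j => j
  | fuel + 1, j =>
    if j < n then
      if g j < g (j - 1) then pvDownAux g n fuel (j + 1) else j
    else j

def pvDown (g : Nat → Int) (n j : Nat) : Nat := pvDownAux g n (n - j) j

-- for j in range(1, len(v)) with A's body (early returns; falling out of both ifs
-- continues with the next range value j+1)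
def pvOuterAux (g : Nat → Int) (n : Nat) : Nat → Nat → Bool
  | 0, _ => true
  | fuel + 1, j =>
    if j < n then
      if g j > g (j - 1) then
        let j' := pvUp g n j
        if j' = n then true
        else if g j' = g (j' - 1) then false
        else if g j' < g (j' - 1) then
          (if pvDown g n j' = n then true else false)
        else pvOuterAux g n fuel (j + 1)
      else if g j < g (j - 1) then
        (if pvDown g n j = n then true else false)
      else pvOuterAux g n fuel (j + 1)
    else true

def pvOuter (g : Nat → Int) (n j : Nat) : Bool := pvOuterAux g n (n - j) j

def check (v : String) : Bool :=
  let l := v.toList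
  let n := l.length
  if n < 3 then false
  else pvOuter (fun j => pvCharInt (l.getD j '0')) n 1

-- ===== PORT B =====
-- _drop_run: drop the leading run of `want` from sig
def pvDropRun : List Int → Int → List Int
  | [], _ => []
  | x :: t, w => if x = w then pvDropRun t w else x :: t

def check_alt (v : String) : Bool :=
  let l := v.toList
  if l.length < 3 then false
  else
    let xs := l.map pvCharInt
    let sig := (xs.zip xs.tail).map
      (fun p => (if p.2 > p.1 then (1 : Int) else 0) - (if p.2 < p.1 then 1 else 0))
    (pvDropRun (pvDropRun (pvDropRun sig 0) 1) (-1)).isEmpty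

-- ===== PRECONDITION & SPEC =====
-- Pre_ excludes strings of length ≥ 3 containing a non-digit character: there Python's
-- int() raises ValueError on A's first comparison touching it — except that A may return
-- False before reaching the non-digit (an increase followed by an equality), where B's
-- up-front conversion of every character naturally raises.
def Pre_check (v : String) : Prop :=
  v.toList.length < 3 ∨ v.toList.all (fun c => c.isDigit) = true
instance (v : String) : Decidable (Pre_check v) := by unfold Pre_check; infer_instance

def pvWitness_check : String := "1231"

def Spec_check (v : String) (out : Bool) : Prop := out = check_alt v
instance (v : String) (out : Bool) : Decidable (Spec_check v out) := by unfold Spec_check; infer_instance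

-- ===== CLAIM (what is proved, stated in full; the proofs are below) =====
def Claim_equal_check : Prop := ∀ (v : String), Dom_check v → Pre_check v → Spec_check v (check v)

-- ===== LEMMAS AND PROOFS =====

-- list-level mirror of A used only in the proofs
def upPairL : Int → List Int → Int × List Int
  | p, [] => (p, [])
  | p, x :: t => if x > p then upPairL x t else (p, x :: t)

def downPairL : Int → List Int → Int × List Int
  | p, [] => (p, [])
  | p, x :: t => if x < p then downPairL x t else (p, x :: t)

def outerL : Int → List Int → Bool
  | _, [] => true
  | prev, x :: t =>
    if x > prev then
      match upPairL x t with
      | (p, []) => true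
      | (p, y :: s) =>
        if y = p then false
        else if y < p then (downPairL y s).2.isEmpty
        else outerL x t
    else if x < prev then (downPairL x t).2.isEmpty
    else outerL x t
termination_by _ l => l.length
decreasing_by
  all_goals simp_all
  all_goals omega

def sigOfP : Int → List Int → List Int
  | _, [] => []
  | p, x :: t => ((if x > p then (1 : Int) else 0) - (if x < p then 1 else 0)) :: sigOfP x t

theorem upPairL_stop (t : List Int) (p : Int) (q y : Int) (s : List Int)
    (h : upPairL p t = (q, y :: s)) : ¬ (y > q) := by
  induction t generalizing p with
  | nil => simp [upPairL] at h
  | cons x t ih =>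
    by_cases hx : x > p
    · simp [upPairL, hx] at h; exact ih x h
    · simp only [upPairL, if_neg hx] at h
      cases h
      exact hx

theorem downPairL_isEmpty (s : List Int) (y : Int) :
    (downPairL y s).2.isEmpty = (pvDropRun (sigOfP y s) (-1)).isEmpty := by
  induction s generalizing y with
  | nil => simp [downPairL, sigOfP, pvDropRun]
  | cons z s ih =>
    by_cases hz : z < y
    · simp [downPairL, hz, sigOfP, pvDropRun, show ¬ z > y by omega, ih]
    · by_cases hz2 : z > y
      · simp [downPairL, hz, sigOfP, pvDropRun, hz2]
      · simp [downPairL, hz, sigOfP, pvDropRun, hz2]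

theorem upPairL_shape (t : List Int) (p : Int) :
    (match upPairL p t with
     | (_, []) => true
     | (q, y :: s) => if y = q then false else (downPairL y s).2.isEmpty) =
    (pvDropRun (pvDropRun (sigOfP p t) 1) (-1)).isEmpty := by
  induction t generalizing p with
  | nil => simp [upPairL, sigOfP, pvDropRun]
  | cons y s ih =>
    by_cases hy : y > p
    · have h1 : ¬ y < p := by omega
      simpa [upPairL, hy, h1, sigOfP, pvDropRun] using ih y
    · by_cases he : y = p
      · subst he
        simp [upPairL, sigOfP, pvDropRun]
      · have hlt : y < p := by omega
        simp [upPairL, hy, sigOfP, pvDropRun, he, hlt,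
          show ¬ (0 : Int) - 1 = 1 by omega]
        exact downPairL_isEmpty s y

theorem outerL_shape (t : List Int) (prev : Int) :
    outerL prev t =
      (pvDropRun (pvDropRun (pvDropRun (sigOfP prev t) 0) 1) (-1)).isEmpty := by
  induction t generalizing prev with
  | nil => simp [outerL, sigOfP, pvDropRun]
  | cons x t ih =>
    by_cases hx : x > prev
    · have hs := upPairL_shape t x
      rw [outerL]
      simp only [hx, if_pos]
      have : (match upPairL x t with
        | (p, []) => true
        | (p, y :: s) =>
          if y = p then false
          else if y < p then (downPairL y s).2.isEmpty
          else outerL x t) =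
        (match upPairL x t with
         | (_, []) => true
         | (q, y :: s) => if y = q then false else (downPairL y s).2.isEmpty) := by
        rcases h : upPairL x t with ⟨q, r⟩
        cases r with
        | nil => rfl
        | cons y s =>
          have hstop := upPairL_stop t x q y s h
          by_cases he : y = q
          · simp [he]
          · simp [he, show y < q by omega]
      rw [this, hs]
      simp [sigOfP, pvDropRun, hx, show ¬ x < prev by omega]
    · by_cases he : x = prev
      · subst he
        rw [outerL]
        simp [sigOfP, pvDropRun, ih]
      · have hlt : x < prev := by omega
        rw [outerL]
        simp [hx, hlt, sigOfP, pvDropRun, show ¬ ((0:Int) - 1 = 0) by omega,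
          show ¬ ((0:Int) - 1 = 1) by omega]
        exact downPairL_isEmpty t x

-- ===== index ↔ list bridge for port A =====

-- one-step unfolding equations for the fuelled loops (fuel n - j is always sufficient)
theorem pvUp_eq (g : Nat → Int) (n j : Nat) :
    pvUp g n j = if j < n then (if g j > g (j - 1) then pvUp g n (j + 1) else j) else j := by
  unfold pvUp
  by_cases h : j < n
  · have hh : n - j = (n - (j + 1)) + 1 := by omega
    rw [hh]
    simp [pvUpAux, h]
  · cases hf : n - j with
    | zero => simp [pvUpAux, h]
    | succ m => simp [pvUpAux, h]

theorem pvDown_eq (g : Nat → Int) (n j : Nat) :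
    pvDown g n j = if j < n then (if g j < g (j - 1) then pvDown g n (j + 1) else j) else j := by
  unfold pvDown
  by_cases h : j < n
  · have hh : n - j = (n - (j + 1)) + 1 := by omega
    rw [hh]
    simp [pvDownAux, h]
  · cases hf : n - j with
    | zero => simp [pvDownAux, h]
    | succ m => simp [pvDownAux, h]

theorem pvOuter_eq (g : Nat → Int) (n j : Nat) :
    pvOuter g n j =
      (if j < n then
        if g j > g (j - 1) then
          let j' := pvUp g n j
          if j' = n then true
          else if g j' = g (j' - 1) then false
          else if g j' < g (j' - 1) then
            (if pvDown g n j' = n then true else false)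
          else pvOuter g n (j + 1)
        else if g j < g (j - 1) then
          (if pvDown g n j = n then true else false)
        else pvOuter g n (j + 1)
      else true) := by
  unfold pvOuter
  by_cases h : j < n
  · have hh : n - j = (n - (j + 1)) + 1 := by omega
    rw [hh]
    simp [pvOuterAux, h]
  · cases hf : n - j with
    | zero => simp [pvOuterAux, h]
    | succ m => simp [pvOuterAux, h]

theorem pvUp_ge (g : Nat → Int) (n k : Nat) :
    ∀ j, n - j = k → j ≤ pvUp g n j := by
  induction k with
  | zero =>
    intro j hk
    have h : ¬ j < n := by omega
    rw [pvUp_eq]; simp [h]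
  | succ k ih =>
    intro j hk
    have h : j < n := by omega
    rw [pvUp_eq]
    by_cases hc : g j > g (j - 1)
    · simp only [if_pos h, if_pos hc]
      have := ih (j + 1) (by omega)
      omega
    · simp [h, hc]

theorem pvUp_le (g : Nat → Int) (n k : Nat) :
    ∀ j, n - j = k → j ≤ n → pvUp g n j ≤ n := by
  induction k with
  | zero =>
    intro j hk hj
    have h : ¬ j < n := by omega
    rw [pvUp_eq]; simp [h]; omega
  | succ k ih =>
    intro j hk hj
    have h : j < n := by omega
    rw [pvUp_eq]
    by_cases hc : g j > g (j - 1)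
    · simp only [if_pos h, if_pos hc]
      exact ih (j + 1) (by omega) (by omega)
    · simp [h, hc]; omega

theorem pvUp_stop (g : Nat → Int) (n k : Nat) :
    ∀ j, n - j = k → pvUp g n j < n → ¬ (g (pvUp g n j) > g (pvUp g n j - 1)) := by
  induction k with
  | zero =>
    intro j hk hlt
    have h : ¬ j < n := by omega
    rw [pvUp_eq] at hlt
    simp [h] at hlt
  | succ k ih =>
    intro j hk hlt
    have h : j < n := by omega
    rw [pvUp_eq] at hlt ⊢
    by_cases hc : g j > g (j - 1)
    · simp only [if_pos h, if_pos hc] at hlt ⊢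
      exact ih (j + 1) (by omega) hlt
    · simp only [if_pos h, if_neg hc] at hlt ⊢
      exact hc

theorem pvDown_le (g : Nat → Int) (n k : Nat) :
    ∀ j, n - j = k → j ≤ n → pvDown g n j ≤ n := by
  induction k with
  | zero =>
    intro j hk hj
    have h : ¬ j < n := by omega
    rw [pvDown_eq]; simp [h]; omega
  | succ k ih =>
    intro j hk hj
    have h : j < n := by omega
    rw [pvDown_eq]
    by_cases hc : g j < g (j - 1)
    · simp only [if_pos h, if_pos hc]
      exact ih (j + 1) (by omega) (by omega)
    · simp [h, hc]; omega

theorem drop_eq_getD_cons (xs : List Int) (j : Nat) (h : j < xs.length) :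
    xs.drop j = xs.getD j 0 :: xs.drop (j + 1) := by
  rw [List.drop_eq_getElem_cons h, List.getD_eq_getElem xs 0 h]

theorem drop_cons_g (xs : List Int) (g : Nat → Int) (hg : ∀ i, g i = xs.getD i 0)
    (j : Nat) (h : j < xs.length) : xs.drop j = g j :: xs.drop (j + 1) := by
  rw [hg j]; exact drop_eq_getD_cons xs j h

theorem pvUp_bridge (xs : List Int) (g : Nat → Int) (hg : ∀ i, g i = xs.getD i 0) (k : Nat) :
    ∀ j, xs.length - j = k → 1 ≤ j →
      upPairL (g (j - 1)) (xs.drop j) =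
        (g (pvUp g xs.length j - 1), xs.drop (pvUp g xs.length j)) := by
  induction k with
  | zero =>
    intro j hk hj
    have h : ¬ j < xs.length := by omega
    have hd : xs.drop j = [] := List.drop_eq_nil_of_le (by omega)
    rw [pvUp_eq]
    simp [h, hd, upPairL]
  | succ k ih =>
    intro j hk hj
    have h : j < xs.length := by omega
    rw [drop_cons_g xs g hg j h, pvUp_eq]
    by_cases hc : g j > g (j - 1)
    · simp only [upPairL, if_pos hc, if_pos h]
      have := ih (j + 1) (by omega) (by omega)
      simpa using this
    · simp only [upPairL, if_neg hc, if_pos h]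
      rw [← drop_cons_g xs g hg j h]

theorem pvDown_bridge (xs : List Int) (g : Nat → Int) (hg : ∀ i, g i = xs.getD i 0) (k : Nat) :
    ∀ j, xs.length - j = k → 1 ≤ j →
      downPairL (g (j - 1)) (xs.drop j) =
        (g (pvDown g xs.length j - 1), xs.drop (pvDown g xs.length j)) := by
  induction k with
  | zero =>
    intro j hk hj
    have h : ¬ j < xs.length := by omega
    have hd : xs.drop j = [] := List.drop_eq_nil_of_le (by omega)
    rw [pvDown_eq]
    simp [h, hd, downPairL]
  | succ k ih =>
    intro j hk hj
    have h : j < xs.length := by omega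
    rw [drop_cons_g xs g hg j h, pvDown_eq]
    by_cases hc : g j < g (j - 1)
    · simp only [downPairL, if_pos hc, if_pos h]
      have := ih (j + 1) (by omega) (by omega)
      simpa using this
    · simp only [downPairL, if_neg hc, if_pos h]
      rw [← drop_cons_g xs g hg j h]

theorem drop_isEmpty_iff (xs : List Int) (d : Nat) (hd : d ≤ xs.length) :
    (xs.drop d).isEmpty = (if d = xs.length then true else false) := by
  by_cases h : d = xs.length
  · simp [h]
  · have hlt : d < xs.length := by omega
    rw [drop_eq_getD_cons xs d hlt]
    simp [h]

theorem pvOuter_bridge (xs : List Int) (g : Nat → Int) (hg : ∀ i, g i = xs.getD i 0) (k : Nat) :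
    ∀ j, xs.length - j = k → 1 ≤ j →
      pvOuter g xs.length j = outerL (g (j - 1)) (xs.drop j) := by
  induction k with
  | zero =>
    intro j hk hj
    have h : ¬ j < xs.length := by omega
    have hd : xs.drop j = [] := List.drop_eq_nil_of_le (by omega)
    rw [pvOuter_eq]
    simp [h, hd, outerL]
  | succ k ih =>
    intro j hk hj
    have h : j < xs.length := by omega
    rw [drop_cons_g xs g hg j h, pvOuter_eq, outerL]
    by_cases hc : g j > g (j - 1)
    · -- A climbs; one unfolding of the while: pvUp g n j = pvUp g n (j+1)
      have hup1 : pvUp g xs.length j = pvUp g xs.length (j + 1) := by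
        rw [pvUp_eq]; simp [h, hc]
      have hup : upPairL (g j) (xs.drop (j + 1)) =
          (g (pvUp g xs.length (j + 1) - 1), xs.drop (pvUp g xs.length (j + 1))) := by
        have := pvUp_bridge xs g hg (xs.length - (j + 1)) (j + 1) rfl (by omega)
        simpa using this
      have hge : j + 1 ≤ pvUp g xs.length (j + 1) :=
        pvUp_ge g xs.length (xs.length - (j + 1)) (j + 1) rfl
      have hle : pvUp g xs.length (j + 1) ≤ xs.length :=
        pvUp_le g xs.length (xs.length - (j + 1)) (j + 1) rfl (by omega)
      simp only [if_pos h, if_pos hc, hup1, hup]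
      by_cases hend : pvUp g xs.length (j + 1) = xs.length
      · have hd0 : xs.drop (pvUp g xs.length (j + 1)) = [] :=
          List.drop_eq_nil_of_le (by omega)
        simp [hend, hd0]
      · have hlt : pvUp g xs.length (j + 1) < xs.length := by omega
        have hstop : ¬ (g (pvUp g xs.length (j + 1)) > g (pvUp g xs.length (j + 1) - 1)) := by
          have := pvUp_stop g xs.length (xs.length - j) j rfl
          rw [hup1] at this
          exact this hlt
        rw [drop_cons_g xs g hg _ hlt]
        by_cases heq : g (pvUp g xs.length (j + 1)) = g (pvUp g xs.length (j + 1) - 1)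
        · simp [hend, heq]
        · have hlt2 : g (pvUp g xs.length (j + 1)) < g (pvUp g xs.length (j + 1) - 1) := by
            omega
          have hdn1 : pvDown g xs.length (pvUp g xs.length (j + 1)) =
              pvDown g xs.length (pvUp g xs.length (j + 1) + 1) := by
            rw [pvDown_eq]; simp [hlt, hlt2]
          have hdown : downPairL (g (pvUp g xs.length (j + 1)))
                (xs.drop (pvUp g xs.length (j + 1) + 1)) =
              (g (pvDown g xs.length (pvUp g xs.length (j + 1) + 1) - 1),
               xs.drop (pvDown g xs.length (pvUp g xs.length (j + 1) + 1))) := by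
            have := pvDown_bridge xs g hg (xs.length - (pvUp g xs.length (j + 1) + 1))
              (pvUp g xs.length (j + 1) + 1) rfl (by omega)
            simpa using this
          have hdle : pvDown g xs.length (pvUp g xs.length (j + 1) + 1) ≤ xs.length :=
            pvDown_le g xs.length (xs.length - (pvUp g xs.length (j + 1) + 1))
              (pvUp g xs.length (j + 1) + 1) rfl (by omega)
          simp only [hend, if_neg hend, if_neg heq, if_pos hlt2, hdn1, hdown]
          simp [drop_isEmpty_iff xs _ hdle]
    · by_cases hc2 : g j < g (j - 1)
      · have hdn1 : pvDown g xs.length j = pvDown g xs.length (j + 1) := by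
          rw [pvDown_eq]; simp [h, hc2]
        have hdown : downPairL (g j) (xs.drop (j + 1)) =
            (g (pvDown g xs.length (j + 1) - 1), xs.drop (pvDown g xs.length (j + 1))) := by
          have := pvDown_bridge xs g hg (xs.length - (j + 1)) (j + 1) rfl (by omega)
          simpa using this
        have hdle : pvDown g xs.length (j + 1) ≤ xs.length :=
          pvDown_le g xs.length (xs.length - (j + 1)) (j + 1) rfl (by omega)
        simp only [if_pos h, if_neg hc, if_pos hc2, hdn1, hdown]
        simp [drop_isEmpty_iff xs _ hdle]
      · -- equal pair: both continue with the next index / tail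
        simp only [if_pos h, if_neg hc, if_neg hc2]
        have := ih (j + 1) (by omega) (by omega)
        simpa using this

-- ===== assembling the two ports =====

theorem pvCharInt_zero : pvCharInt '0' = 0 := by decide

theorem getD_map_pvCharInt (l : List Char) (i : Nat) :
    (l.map pvCharInt).getD i 0 = pvCharInt (l.getD i '0') := by
  by_cases h : i < l.length
  · rw [List.getD_eq_getElem _ _ (by simpa using h), List.getD_eq_getElem _ _ h]
    simp
  · rw [List.getD_eq_default _ _ (by simpa using (by omega : l.length ≤ i)),
        List.getD_eq_default _ _ (by omega)]
    exact pvCharInt_zero.symm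

theorem zip_sig (xs : List Int) :
    (xs.zip xs.tail).map
      (fun p => (if p.2 > p.1 then (1 : Int) else 0) - (if p.2 < p.1 then 1 else 0)) =
    (match xs with | [] => [] | x :: t => sigOfP x t) := by
  induction xs with
  | nil => rfl
  | cons x t ih =>
    cases t with
    | nil => rfl
    | cons y s =>
      simp only [List.tail_cons] at ih ⊢
      simp only [List.zip_cons_cons, List.map_cons, sigOfP]
      rw [ih]

theorem check_eq_check_alt (v : String) : check v = check_alt v := by
  unfold check check_alt
  by_cases h : v.toList.length < 3
  · simp only [if_pos h]
  · simp only [if_neg h]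
    have hgn : v.toList.length = (v.toList.map pvCharInt).length := by
      rw [List.length_map]
    have hgf : ∀ i, pvCharInt (v.toList.getD i '0') =
        (v.toList.map pvCharInt).getD i 0 := fun i => (getD_map_pvCharInt v.toList i).symm
    obtain ⟨x, t, hx⟩ : ∃ x t, v.toList.map pvCharInt = x :: t := by
      cases hxs : v.toList.map pvCharInt with
      | nil =>
        rw [hxs, List.length_nil] at hgn
        omega
      | cons a b => exact ⟨a, b, rfl⟩
    have hg0 : pvCharInt (v.toList.getD (1 - 1) '0') = x := by
      rw [hgf, hx]; rfl
    have hdrop : (v.toList.map pvCharInt).drop 1 = t := by rw [hx]; rfl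
    have hsig : (match v.toList.map pvCharInt with
        | [] => ([] : List Int) | x :: t => sigOfP x t) = sigOfP x t := by rw [hx]
    rw [hgn,
      pvOuter_bridge (v.toList.map pvCharInt) (fun j => pvCharInt (v.toList.getD j '0'))
        hgf ((v.toList.map pvCharInt).length - 1) 1 rfl (by omega),
      zip_sig (v.toList.map pvCharInt)]
    rw [hsig, hdrop, hg0]
    exact outerL_shape t x

-- ===== VERDICT (by name: the statement is the Claim_ definition above) =====
theorem check_spec : Claim_equal_check := by
  unfold Claim_equal_check Spec_check
  intro v _ _
  exact check_eq_check_alt v
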